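-- pv_equiv track=rewrite | github.com/CaseScope/caseScope_2026 | utils/hayabusa_correlator.py | _map_to_kill_chain
-- ===== SOURCE A (Python) =====
-- from typing import List, Dict, Any, Optional, Tuple
--
-- MITRE_TACTIC_ORDER = [
--     'reconnaissance',
--     'resource-development',
--     'initial-access',
--     'execution',
--     'persistence',
--     'privilege-escalation',
--     'defense-evasion',
--     'credential-access',
--     'discovery',
--     'lateral-movement',
--     'collection',
--     'command-and-control',
--     'exfiltration',
--     'impact'
-- ]
--
-- def _map_to_kill_chain(tactics: List[str]) -> List[str]:
--     """Map MITRE tactics to kill chain phases, maintaining order"""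
--     if not tactics:
--         return []
--
--     phases = []
--     for tactic in MITRE_TACTIC_ORDER:
--         if tactic in [t.lower() for t in tactics]:
--             phases.append(tactic)
--
--     return phases
-- ===== SOURCE B (Python) =====
-- from typing import List
--
-- MITRE_TACTIC_ORDER = [
--     'reconnaissance',
--     'resource-development',
--     'initial-access',
--     'execution',
--     'persistence',
--     'privilege-escalation',
--     'defense-evasion',
--     'credential-access',
--     'discovery',
--     'lateral-movement',
--     'collection',
--     'command-and-control',
--     'exfiltration',
--     'impact'
-- ]
--
-- def _map_to_kill_chain(tactics: List[str]) -> List[str]: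
--     """Map MITRE tactics to kill chain phases, maintaining order"""
--     if not tactics:
--         return []
--     present = {t.lower() for t in tactics if t.lower() in MITRE_TACTIC_ORDER}
--     return sorted(present, key=MITRE_TACTIC_ORDER.index)
-- ===== Notes on version B (the rewrite author's own statement) =====
-- stated objective: faster
-- what changed: B makes one pass over the input collecting known lowercased tactics into a set and sorts them by their canonical index, instead of rebuilding the lowercased input list and scanning it once per canonical phase.
import Mathlib
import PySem

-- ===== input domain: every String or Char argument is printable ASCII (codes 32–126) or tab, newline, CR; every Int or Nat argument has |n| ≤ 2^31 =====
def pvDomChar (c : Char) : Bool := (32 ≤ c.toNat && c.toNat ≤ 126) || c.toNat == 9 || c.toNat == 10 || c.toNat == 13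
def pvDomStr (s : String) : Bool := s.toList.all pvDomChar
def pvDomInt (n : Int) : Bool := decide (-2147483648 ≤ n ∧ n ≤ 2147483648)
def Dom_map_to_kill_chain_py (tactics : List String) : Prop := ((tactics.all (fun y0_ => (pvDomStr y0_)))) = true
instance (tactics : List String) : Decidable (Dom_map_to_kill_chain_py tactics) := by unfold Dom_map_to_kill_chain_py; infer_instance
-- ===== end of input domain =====

-- B: one pass over the input collecting known lowercased tactics into a set, then a sort by canonical index,
-- instead of A's rescan of the (rebuilt) lowercased input once per canonical phase.

def MITRE_TACTIC_ORDER : List String :=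
  ["reconnaissance", "resource-development", "initial-access", "execution",
   "persistence", "privilege-escalation", "defense-evasion", "credential-access",
   "discovery", "lateral-movement", "collection", "command-and-control",
   "exfiltration", "impact"]

-- ===== PORT A =====
def map_to_kill_chain_py (tactics : List String) : List String :=
  if tactics = [] then []
  else
    MITRE_TACTIC_ORDER.foldl
      (fun phases tactic =>
        if tactic ∈ tactics.map (fun t => PySem.Str.lower t) then phases ++ [tactic]
        else phases) []

-- ===== PORT B =====
-- key: MITRE_TACTIC_ORDER.index(t); PySem.List.index? with getD 0 — exact on every element of
-- `present`, which only holds members of MITRE_TACTIC_ORDER (Python's .index raises only off that set).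
def map_to_kill_chain_py_alt (tactics : List String) : List String :=
  if tactics = [] then []
  else
    let present : List String :=
      PySem.Set.ofList ((tactics.map (fun t => PySem.Str.lower t)).filter
        (fun t => t ∈ MITRE_TACTIC_ORDER))
    PySem.List.sorted present (fun t => (PySem.List.index? MITRE_TACTIC_ORDER t).getD 0) false

-- ===== PRECONDITION & SPEC =====
def Spec_map_to_kill_chain_py (tactics : List String) (out : List String) : Prop := out = map_to_kill_chain_py_alt tactics
instance (tactics : List String) (out : List String) : Decidable (Spec_map_to_kill_chain_py tactics out) := by unfold Spec_map_to_kill_chain_py; infer_instance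

-- ===== CLAIM (what is proved, stated in full; the proofs are below) =====
def Claim_equal_map_to_kill_chain_py : Prop := ∀ (tactics : List String), Dom_map_to_kill_chain_py tactics → Spec_map_to_kill_chain_py tactics (map_to_kill_chain_py tactics)

-- ===== LEMMAS AND PROOFS =====

-- A's loop is the filter of the canonical order by membership in the lowercased input.
theorem mkc_A_eq_filter (tactics : List String) (h : ¬ tactics = []) :
    map_to_kill_chain_py tactics =
      MITRE_TACTIC_ORDER.filter
        (fun tactic => tactic ∈ tactics.map (fun t => PySem.Str.lower t)) := by
  simp [map_to_kill_chain_py, h, PySem.List.foldl_append_ite_eq_filter]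

-- The canonical order is strictly increasing under B's sort key.
theorem mkc_order_pairwise :
    MITRE_TACTIC_ORDER.Pairwise
      (fun a b => ((PySem.List.index? MITRE_TACTIC_ORDER a).getD 0 : Nat) <
                  (PySem.List.index? MITRE_TACTIC_ORDER b).getD 0) := by
  decide

theorem map_to_kill_chain_py_spec' (tactics : List String) :
    map_to_kill_chain_py tactics = map_to_kill_chain_py_alt tactics := by
  by_cases h : tactics = []
  · simp [map_to_kill_chain_py, map_to_kill_chain_py_alt, h]
  · rw [mkc_A_eq_filter tactics h]
    unfold map_to_kill_chain_py_alt
    simp only [if_neg h]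
    have hperm : (MITRE_TACTIC_ORDER.filter
        (fun tactic => tactic ∈ tactics.map (fun t => PySem.Str.lower t))).Perm
        (PySem.Set.ofList ((tactics.map (fun t => PySem.Str.lower t)).filter
          (fun t => t ∈ MITRE_TACTIC_ORDER))) := by
      -- both sides are nodup with the same membership
      rw [List.perm_ext_iff_of_nodup ((by decide : MITRE_TACTIC_ORDER.Nodup).filter _)
        (PySem.Set.nodup_ofList _)]
      intro a
      simp [PySem.Set.mem_ofList, List.mem_filter, and_comm]
    exact (PySem.List.sorted_eq_of_perm_of_pairwise_lt _ _ _ hperm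
      (mkc_order_pairwise.filter _)).symm

-- ===== VERDICT (by name: the statement is the Claim_ definition above) =====
theorem map_to_kill_chain_py_spec : Claim_equal_map_to_kill_chain_py := by
  intro tactics _
  exact map_to_kill_chain_py_spec' tactics
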